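-- pv_equiv track=rewrite | github.com/Mostafa-Emad77/document-evidence-matcher | backend/services/span_colorizer.py | _has_fuzzy_overlap
-- ===== SOURCE A (Python) =====
-- def _has_fuzzy_overlap(a_tokens: set[str], b_tokens: set[str]) -> bool:
--     for a in a_tokens:
--         for b in b_tokens:
--             if a == b:
--                 return True
--             if len(a) >= 4 and len(b) >= 4 and (a in b or b in a):
--                 return True
--     return False
-- ===== SOURCE B (Python) =====
-- def _has_fuzzy_overlap(a_tokens: set[str], b_tokens: set[str]) -> bool:
--     # Exact matches: one set intersection.
--     if a_tokens & b_tokens: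
--         return True
--     # Substring index: collect every substring of length >= 4 of each side's
--     # tokens, then the fuzzy condition is just a set-membership test:
--     # some long token of one side occurring inside a token of the other side.
--     def long_subs(tokens):
--         subs = set()
--         for t in tokens:
--             n = len(t)
--             for i in range(n):
--                 for j in range(i + 4, n + 1):
--                     subs.add(t[i:j])
--         return subs
--     long_a = {t for t in a_tokens if len(t) >= 4}
--     long_b = {t for t in b_tokens if len(t) >= 4}
--     return bool(long_a & long_subs(b_tokens)) or bool(long_b & long_subs(a_tokens))
-- ===== Notes on version B (the rewrite author's own statement) =====
-- stated objective: alternative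
-- what changed: Replaces A's nested pairwise scan by a set-intersection pass for exact matches plus a precomputed substring index: all length>=4 substrings of each side's tokens are collected into a set, and the fuzzy condition becomes two set-intersection tests, eliminating the pairwise substring loop entirely.
import Mathlib
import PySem

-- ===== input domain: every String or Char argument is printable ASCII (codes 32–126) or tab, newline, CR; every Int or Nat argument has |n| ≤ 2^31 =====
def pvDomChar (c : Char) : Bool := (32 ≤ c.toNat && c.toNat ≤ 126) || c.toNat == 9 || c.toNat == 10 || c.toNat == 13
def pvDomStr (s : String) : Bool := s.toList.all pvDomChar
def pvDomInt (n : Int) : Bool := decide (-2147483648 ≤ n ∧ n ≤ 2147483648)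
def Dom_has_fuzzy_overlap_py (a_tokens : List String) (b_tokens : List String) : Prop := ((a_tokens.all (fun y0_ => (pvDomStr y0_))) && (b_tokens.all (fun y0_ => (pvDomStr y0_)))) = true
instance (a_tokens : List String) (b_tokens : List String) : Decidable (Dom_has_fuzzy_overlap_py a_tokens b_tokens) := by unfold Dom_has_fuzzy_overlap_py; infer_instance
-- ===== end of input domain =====

-- B replaces A's nested pairwise scan by a set-intersection pass for exact matches plus a
-- precomputed index of all length-≥4 substrings, turning the fuzzy check into set intersections
-- (objective: alternative algorithm).

-- ===== PORT A =====
-- nested for-loops with early 'return True' on the first matching pair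
def has_fuzzy_overlap_py (a_tokens : List String) (b_tokens : List String) : Bool :=
  a_tokens.any (fun a => b_tokens.any (fun b =>
    a == b ||
    (decide (4 ≤ PySem.Str.len a) && decide (4 ≤ PySem.Str.len b) &&
      (PySem.Str.isIn a b || PySem.Str.isIn b a))))

-- ===== PORT B =====
-- long_subs: the set of all substrings t[i:j] of length >= 4 of the given tokens
def pvLongSubs (tokens : List String) : PySem.Set String :=
  tokens.foldl (fun subs t =>
    (PySem.List.pyRange 0 (PySem.Str.len t) 1).foldl (fun subs i =>
      (PySem.List.pyRange (i + 4) (PySem.Str.len t + 1) 1).foldl (fun subs j =>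
        PySem.Set.add subs (PySem.Str.slice t (some i) (some j))) subs) subs)
    PySem.Set.empty

def has_fuzzy_overlap_py_alt (a_tokens : List String) (b_tokens : List String) : Bool :=
  if PySem.Set.inter a_tokens b_tokens ≠ [] then
    true
  else
    let long_a := PySem.Set.ofList (a_tokens.filter (fun t => decide (4 ≤ PySem.Str.len t)))
    let long_b := PySem.Set.ofList (b_tokens.filter (fun t => decide (4 ≤ PySem.Str.len t)))
    decide (PySem.Set.inter long_a (pvLongSubs b_tokens) ≠ []) ||
      decide (PySem.Set.inter long_b (pvLongSubs a_tokens) ≠ [])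

-- ===== PRECONDITION & SPEC =====
def Spec_has_fuzzy_overlap_py (a_tokens : List String) (b_tokens : List String) (out : Bool) : Prop := out = has_fuzzy_overlap_py_alt a_tokens b_tokens
instance (a_tokens : List String) (b_tokens : List String) (out : Bool) : Decidable (Spec_has_fuzzy_overlap_py a_tokens b_tokens out) := by unfold Spec_has_fuzzy_overlap_py; infer_instance

-- ===== CLAIM =====
def Claim_equal_has_fuzzy_overlap_py : Prop := ∀ (a_tokens : List String) (b_tokens : List String), Dom_has_fuzzy_overlap_py a_tokens b_tokens → Spec_has_fuzzy_overlap_py a_tokens b_tokens (has_fuzzy_overlap_py a_tokens b_tokens)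

-- ===== LEMMAS AND PROOFS =====

-- generic membership lemma for a foldl whose step adds elements described by P
lemma mem_foldl_step {α : Type} (g : List String → α → List String)
    (P : α → String → Prop)
    (h : ∀ acc t x, x ∈ g acc t ↔ x ∈ acc ∨ P t x) :
    ∀ (L : List α) (s : List String) (x : String),
      x ∈ L.foldl g s ↔ x ∈ s ∨ ∃ t ∈ L, P t x := by
  intro L
  induction L with
  | nil => simp
  | cons a L ih =>
    intro s x
    simp only [List.foldl_cons, ih, h, List.mem_cons]
    constructor
    · rintro (( hx | hp) | ⟨t, ht, hp⟩)
      · exact Or.inl hx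
      · exact Or.inr ⟨a, Or.inl rfl, hp⟩
      · exact Or.inr ⟨t, Or.inr ht, hp⟩
    · rintro (hx | ⟨t, (rfl | ht), hp⟩)
      · exact Or.inl (Or.inl hx)
      · exact Or.inl (Or.inr hp)
      · exact Or.inr ⟨t, ht, hp⟩

-- characterization of the substring index
lemma mem_pvLongSubs (tokens : List String) (x : String) :
    x ∈ pvLongSubs tokens ↔
      ∃ t ∈ tokens, 4 ≤ x.toList.length ∧ x.toList <:+: t.toList := by
  unfold pvLongSubs
  rw [mem_foldl_step _ (fun t x => 4 ≤ x.toList.length ∧ x.toList <:+: t.toList)]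
  · simp [PySem.Set.empty]
  · intro acc t x
    rw [mem_foldl_step _ (fun i x => ∃ j, ((i + 4 ≤ j ∧ j < PySem.Str.len t + 1) ∧
          x = PySem.Str.slice t (some i) (some j)))]
    · have hlen : PySem.Str.len t = (t.toList.length : Int) := by
        simp [PySem.Str.len_eq]
      constructor
      · rintro (hx | ⟨i, hi, j, ⟨hj1, hj2⟩, rfl⟩)
        · exact Or.inl hx
        · refine Or.inr ?_
          rw [PySem.List.mem_pyRange_one] at hi
          obtain ⟨hi0, hin⟩ := hi
          rw [hlen] at hin hj2
          have h0j : (0:Int) ≤ j := by omega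
          have hjn : j.toNat ≤ t.toList.length := by omega
          have hij : i.toNat + 4 ≤ j.toNat := by omega
          have hsl : (PySem.Str.slice t (some i) (some j)).toList
              = (t.toList.drop i.toNat).take (j.toNat - i.toNat) := by
            simp only [PySem.Str.toList_slice, PySem.Chars.slice_eq_listSlice]
            exact PySem.List.slice_toNat _ hi0 h0j
          constructor
          · rw [hsl, List.length_take, List.length_drop]
            omega
          · rw [hsl]
            exact ((t.toList.drop i.toNat).take_prefix _).isInfix.trans
              (t.toList.drop_suffix i.toNat).isInfix
      · rintro (hx | ⟨h4, hinf⟩)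
        · exact Or.inl hx
        · refine Or.inr ?_
          obtain ⟨s, u, hsu⟩ := hinf
          have hlt : s.length + x.toList.length + u.length = t.toList.length := by
            rw [← hsu]; simp; omega
          refine ⟨(s.length : Int), ?_, (s.length : Int) + (x.toList.length : Int),
            ⟨⟨by omega, by rw [hlen]; omega⟩, ?_⟩⟩
          · rw [PySem.List.mem_pyRange_one, hlen]
            constructor
            · positivity
            · omega
          · apply (String.toList_inj).mp
            have hsl : (PySem.Str.slice t (some (s.length : Int))
                (some ((s.length : Int) + (x.toList.length : Int)))).toList
                = (t.toList.drop s.length).take x.toList.length := by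
              simp only [PySem.Str.toList_slice, PySem.Chars.slice_eq_listSlice]
              rw [PySem.List.slice_natCast_add]
            rw [hsl, ← hsu]
            simp
    · intro acc i x
      rw [mem_foldl_step _ (fun j x => x = PySem.Str.slice t (some i) (some j))]
      · simp only [PySem.List.mem_pyRange_one]
      · intro acc j x
        exact PySem.Set.mem_add _ _ _

lemma inter_ne_nil_iff (a_tokens b_tokens : List String) :
    PySem.Set.inter a_tokens b_tokens ≠ [] ↔ ∃ x, x ∈ a_tokens ∧ x ∈ b_tokens := by
  constructor
  · intro h
    rcases List.exists_mem_of_ne_nil _ h with ⟨x, hx⟩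
    exact ⟨x, (PySem.Set.mem_inter _ _ _).mp hx⟩
  · rintro ⟨x, hx1, hx2⟩ h
    have hm := (PySem.Set.mem_inter a_tokens b_tokens x).mpr ⟨hx1, hx2⟩
    rw [h] at hm
    simp at hm

-- both programs compute the same Boolean
lemma both_eq (A B : List String) :
    has_fuzzy_overlap_py A B = has_fuzzy_overlap_py_alt A B := by
  by_cases hsh : ∃ x, x ∈ A ∧ x ∈ B
  · have hne : PySem.Set.inter A B ≠ [] := (inter_ne_nil_iff _ _).mpr hsh
    rw [has_fuzzy_overlap_py_alt, if_pos hne]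
    obtain ⟨x, hx1, hx2⟩ := hsh
    simp only [has_fuzzy_overlap_py, List.any_eq_true]
    exact ⟨x, hx1, x, hx2, by simp⟩
  · have hne : ¬ PySem.Set.inter A B ≠ [] := fun h => hsh ((inter_ne_nil_iff _ _).mp h)
    rw [has_fuzzy_overlap_py_alt, if_neg hne]
    push Not at hsh
    apply Bool.eq_iff_iff.mpr
    simp only [has_fuzzy_overlap_py, List.any_eq_true, Bool.or_eq_true, Bool.and_eq_true,
      beq_iff_eq, decide_eq_true_eq, inter_ne_nil_iff,
      PySem.Set.mem_ofList, List.mem_filter, mem_pvLongSubs, PySem.Str.isIn_iff_infix]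
    have hlen : ∀ s : String, PySem.Str.len s = (s.toList.length : Int) := by
      intro s; simp [PySem.Str.len_eq]
    constructor
    · rintro ⟨a, ha, b, hb, (rfl | ⟨⟨h4a, h4b⟩, hab | hba⟩)⟩
      · exact absurd hb (hsh a ha)
      · have h4a' : 4 ≤ a.toList.length := by have := hlen a; omega
        exact Or.inl ⟨a, ⟨ha, h4a⟩, b, hb, h4a', hab⟩
      · have h4b' : 4 ≤ b.toList.length := by have := hlen b; omega
        exact Or.inr ⟨b, ⟨hb, h4b⟩, a, ha, h4b', hba⟩
    · rintro (⟨x, ⟨hx, h4x⟩, t, ht, h4, hinf⟩ | ⟨x, ⟨hx, h4x⟩, t, ht, h4, hinf⟩)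
      · have h4t : 4 ≤ PySem.Str.len t := by
          have := hinf.length_le; have := hlen t; omega
        exact ⟨x, hx, t, ht, Or.inr ⟨⟨h4x, h4t⟩, Or.inl hinf⟩⟩
      · have h4t : 4 ≤ PySem.Str.len t := by
          have := hinf.length_le; have := hlen t; omega
        exact ⟨t, ht, x, hx, Or.inr ⟨⟨h4t, h4x⟩, Or.inr hinf⟩⟩

-- ===== VERDICT =====
theorem has_fuzzy_overlap_py_spec : Claim_equal_has_fuzzy_overlap_py := by
  intro A B _
  exact both_eq A B
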